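-- pv_equiv track=rewrite | github.com/Cybrito-Labs/CipherVerse | CipherVerse_backend.py | lorenz_stream
-- ===== SOURCE A (Python) =====
-- def lorenz_stream(wheels, length):
--     import string
--
--     ALPHABET = string.ascii_uppercase + " "
--     stream = []
--     for i in range(length):
--         value = 0
--         for w in wheels:
--             value ^= w[i % len(w)]
--         stream.append(value)
--     return stream
-- ===== SOURCE B (Python) =====
-- def lorenz_stream(wheels, length):
--     stream = [0] * length
--     for w in wheels:
--         tiled = []
--         while len(tiled) < length:
--             tiled.extend(w)
--         stream = [s ^ t for s, t in zip(stream, tiled)]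
--     return stream
-- ===== Notes on version B (the rewrite author's own statement) =====
-- stated objective: alternative
-- what changed: B inverts the loop nesting and removes per-element modular indexing: per wheel it materialises a tiled copy of the wheel up to the stream length by repeated extension, then XORs it elementwise into the accumulated stream via zip, instead of computing each position's XOR over all wheels with i % len(w) indexing.
import Mathlib
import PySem

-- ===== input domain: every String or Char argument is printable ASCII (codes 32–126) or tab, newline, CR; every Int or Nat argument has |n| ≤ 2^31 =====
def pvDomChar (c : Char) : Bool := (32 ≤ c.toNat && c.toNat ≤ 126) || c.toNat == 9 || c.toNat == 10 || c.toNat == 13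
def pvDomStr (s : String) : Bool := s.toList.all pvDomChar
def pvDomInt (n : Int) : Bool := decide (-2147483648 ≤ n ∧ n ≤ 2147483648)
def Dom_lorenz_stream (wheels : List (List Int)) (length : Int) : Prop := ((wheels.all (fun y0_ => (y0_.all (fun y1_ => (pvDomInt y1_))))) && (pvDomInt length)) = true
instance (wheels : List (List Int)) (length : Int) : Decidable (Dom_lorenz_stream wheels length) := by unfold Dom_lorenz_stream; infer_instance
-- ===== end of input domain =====

-- B replaces modular indexing by per-wheel tiling (repeated extension to the stream length) XORed in elementwise with zip (alternative decomposition, same cost).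


-- ===== PORT A =====
-- for i in range(length): value = 0; for w in wheels: value ^= w[i % len(w)]; stream.append(value)
def lorenz_stream (wheels : List (List Int)) (length : Int) : List Int :=
  (PySem.List.pyRange 0 length 1).map (fun i =>
    wheels.foldl (fun value w =>
      PySem.Int.bxor value ((PySem.List.pyGet? w (PySem.Int.mod i (w.length : Int))).getD 0)) 0)

-- ===== PORT B =====
-- tiled = []; while len(tiled) < length: tiled.extend(w)
-- (the guard 'w ≠ []' only makes the loop total in Lean: Python diverges there, outside Pre_)
def pvTile (w : List Int) (acc : List Int) (n : Int) : List Int :=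
  if h : (acc.length : Int) < n ∧ w ≠ [] then pvTile w (acc ++ w) n else acc
termination_by n.toNat - acc.length
decreasing_by
  have hw : 0 < w.length := List.length_pos_iff.mpr h.2
  have := h.1
  simp only [List.length_append]
  omega

-- stream = [0]*length; for w in wheels: (tile w) ; stream = [s ^ t for s, t in zip(stream, tiled)]
def lorenz_stream_alt (wheels : List (List Int)) (length : Int) : List Int :=
  wheels.foldl (fun stream w =>
    List.zipWith PySem.Int.bxor stream (pvTile w [] length))
    (List.replicate length.toNat 0)

-- ===== PRECONDITION & SPEC =====
-- Pre_ excludes exactly the inputs on which the Python A raises ZeroDivisionError: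
-- some wheel is empty while length > 0 (B's tiling loop does not terminate there).
def Pre_lorenz_stream (wheels : List (List Int)) (length : Int) : Prop :=
  length ≤ 0 ∨ ∀ w ∈ wheels, w ≠ []
instance (wheels : List (List Int)) (length : Int) : Decidable (Pre_lorenz_stream wheels length) := by unfold Pre_lorenz_stream; infer_instance
def pvWitness_lorenz_stream : List (List Int) × Int := ([[1, 2], [3]], 4)

def Spec_lorenz_stream (wheels : List (List Int)) (length : Int) (out : List Int) : Prop := out = lorenz_stream_alt wheels length
instance (wheels : List (List Int)) (length : Int) (out : List Int) : Decidable (Spec_lorenz_stream wheels length out) := by unfold Spec_lorenz_stream; infer_instance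

-- ===== CLAIM =====
def Claim_equal_lorenz_stream : Prop := ∀ (wheels : List (List Int)) (length : Int), Dom_lorenz_stream wheels length → Pre_lorenz_stream wheels length → Spec_lorenz_stream wheels length (lorenz_stream wheels length)

-- ===== LEMMAS AND PROOFS =====

-- Element k of a whole number of copies of w is w[k % |w|].
theorem pv_flatten_replicate_getElem? (w : List Int) (hw : w ≠ []) (M k : Nat) (hk : k < M * w.length) :
    (List.flatten (List.replicate M w))[k]? = w[k % w.length]? := by
  have hw0 : 0 < w.length := List.length_pos_iff.mpr hw
  induction M generalizing k with
  | zero => omega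
  | succ M ih =>
    rw [List.replicate_succ, List.flatten_cons]
    by_cases hlt : k < w.length
    · rw [List.getElem?_append_left hlt, Nat.mod_eq_of_lt hlt]
    · rw [List.getElem?_append_right (by omega)]
      have hsm : (M + 1) * w.length = M * w.length + w.length := Nat.succ_mul M w.length
      have h1 : k - w.length < M * w.length := by omega
      rw [ih (k - w.length) h1]
      congr 1
      exact (Nat.mod_eq_sub_mod (by omega)).symm

-- The tiling loop, started from a whole number of copies of w, ends on a whole
-- number of copies whose length is at least n.
theorem pv_pvTile_spec (w : List Int) (hw : w ≠ []) (n : Int) (m : Nat) :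
    ∃ M, pvTile w (List.flatten (List.replicate m w)) n = List.flatten (List.replicate M w) ∧
      n ≤ ((List.flatten (List.replicate M w)).length : Int) := by
  have hw0 : 0 < w.length := List.length_pos_iff.mpr hw
  by_cases hlt : ((List.flatten (List.replicate m w)).length : Int) < n
  · rw [pvTile, dif_pos ⟨hlt, hw⟩]
    have hstep : List.flatten (List.replicate m w) ++ w = List.flatten (List.replicate (m+1) w) := by
      rw [List.replicate_succ', List.flatten_append]; simp
    rw [hstep]
    exact pv_pvTile_spec w hw n (m+1)
  · rw [pvTile, dif_neg (by tauto)]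
    exact ⟨m, rfl, by omega⟩
termination_by n.toNat - (List.flatten (List.replicate m w)).length
decreasing_by
  simp only [List.length_flatten, List.map_replicate, List.sum_replicate, smul_eq_mul] at *
  have hsm : (m + 1) * w.length = m * w.length + w.length := Nat.succ_mul m w.length
  omega

-- Element k (k < n.toNat) of the tiled list is w[k % |w|].
theorem pv_pvTile_getElem? (w : List Int) (hw : w ≠ []) (n : Int) (k : Nat) (hk : k < n.toNat) :
    (pvTile w [] n)[k]? = w[k % w.length]? := by
  have hw0 : 0 < w.length := List.length_pos_iff.mpr hw
  obtain ⟨M, hM, hlen⟩ := pv_pvTile_spec w hw n 0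
  have h0 : (List.flatten (List.replicate 0 w)) = ([] : List Int) := by simp
  rw [h0] at hM
  rw [hM]
  have hMlen : (List.flatten (List.replicate M w)).length = M * w.length := by
    simp [List.length_flatten, List.map_replicate, List.sum_replicate]
  exact pv_flatten_replicate_getElem? w hw M k (by omega)

-- The tiled list is at least n.toNat long.
theorem pv_pvTile_length (w : List Int) (hw : w ≠ []) (n : Int) :
    n.toNat ≤ (pvTile w [] n).length := by
  obtain ⟨M, hM, hlen⟩ := pv_pvTile_spec w hw n 0
  have h0 : (List.flatten (List.replicate 0 w)) = ([] : List Int) := by simp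
  rw [h0] at hM
  rw [hM]; omega

-- B's fold acts pointwise: element k of the accumulated stream is A's inner fold started at s[k].
theorem pv_fold_getElem? (wheels : List (List Int)) (hW : ∀ w ∈ wheels, w ≠ [])
    (n : Int) (s : List Int) (hs : s.length = n.toNat) (k : Nat) :
    (wheels.foldl (fun stream w => List.zipWith PySem.Int.bxor stream (pvTile w [] n)) s)[k]? =
    s[k]?.map (fun v => wheels.foldl (fun value w =>
      PySem.Int.bxor value ((PySem.List.pyGet? w (PySem.Int.mod (k : Int) (w.length : Int))).getD 0)) v) := by
  induction wheels generalizing s with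
  | nil => simp
  | cons w ws ih =>
    have hw : w ≠ [] := hW w (by simp)
    have hw0 : 0 < w.length := List.length_pos_iff.mpr hw
    have hlen : (List.zipWith PySem.Int.bxor s (pvTile w [] n)).length = n.toNat := by
      have := pv_pvTile_length w hw n
      simp [List.length_zipWith]; omega
    simp only [List.foldl_cons]
    rw [ih (fun x hx => hW x (by simp [hx])) _ hlen]
    by_cases hk : k < n.toNat
    · have hks : k < s.length := by omega
      have hkt : k < (pvTile w [] n).length := by have := pv_pvTile_length w hw n; omega
      have hmem : k % w.length < w.length := Nat.mod_lt k hw0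
      rw [List.getElem?_zipWith]
      rw [List.getElem?_eq_getElem hks, List.getElem?_eq_getElem hkt]
      have ht := pv_pvTile_getElem? w hw n k hk
      rw [List.getElem?_eq_getElem hkt, List.getElem?_eq_getElem hmem] at ht
      have hmod : PySem.Int.mod (k : Int) (w.length : Int) = ((k % w.length : Nat) : Int) :=
        PySem.Int.mod_natCast k w.length
      have hget : (PySem.List.pyGet? w (PySem.Int.mod (k : Int) (w.length : Int))).getD 0 = w[k % w.length]'hmem := by
        rw [hmod, PySem.List.pyGet?_natCast, List.getElem?_eq_getElem hmem]
        rfl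
      rw [Option.some.inj ht]
      simp only [Option.map_some, hget]
    · rw [List.getElem?_eq_none (by omega), List.getElem?_eq_none (by omega)]
      simp

-- Starting from the empty stream, every pass keeps it empty.
theorem pv_fold_nil (wheels : List (List Int)) (n : Int) :
    wheels.foldl (fun stream w => List.zipWith PySem.Int.bxor stream (pvTile w [] n)) [] = [] := by
  induction wheels with
  | nil => rfl
  | cons w ws ih => simpa using ih

theorem lorenz_stream_spec : Claim_equal_lorenz_stream := by
  intro wheels length _ hpre
  unfold Spec_lorenz_stream lorenz_stream lorenz_stream_alt
  rcases hpre with hle | hW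
  · have h1 : PySem.List.pyRange 0 length 1 = [] := PySem.List.pyRange_one_eq_nil (by omega)
    have h2 : length.toNat = 0 := by omega
    rw [h1, h2, List.replicate_zero, pv_fold_nil]
    simp
  · apply List.ext_getElem?
    intro k
    rw [pv_fold_getElem? wheels hW length _ (by simp) k]
    simp only [List.getElem?_replicate, List.getElem?_map]
    by_cases hk : k < length.toNat
    · have hlen : k < (PySem.List.pyRange 0 length 1).length := by
        simpa [PySem.List.length_pyRange_one] using hk
      rw [List.getElem?_eq_getElem hlen]
      have := PySem.List.getElem_pyRange_one (a := 0) (b := length) (k := k) (h := hlen)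
      simp [hk, this]
    · have hlen : ¬ k < (PySem.List.pyRange 0 length 1).length := by
        simpa [PySem.List.length_pyRange_one] using hk
      rw [List.getElem?_eq_none (by omega)]
      simp [hk]
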